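-- pv_equiv track=rewrite | github.com/ilyxa-openclaw-skills/wa-greenapi-ingest-skill | scripts/greenapi_ingest.py | _docx_parts_for_parse
-- ===== SOURCE A (Python) =====
-- def _docx_parts_for_parse(names: set[str]) -> list[str]:
--     out: list[str] = []
--
--     if "word/document.xml" in names:
--         out.append("word/document.xml")
--
--     for prefix in ("word/header", "word/footer"):
--         for name in sorted(x for x in names if x.startswith(prefix) and x.endswith(".xml")):
--             out.append(name)
--
--     for name in ("word/footnotes.xml", "word/endnotes.xml", "word/comments.xml"):
--         if name in names:
--             out.append(name)
--
--     # Иногда полезный текст бывает в glossary/текст-боксах.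
--     for name in sorted(x for x in names if x.startswith("word/glossary/") and x.endswith(".xml")):
--         out.append(name)
--
--     # unique с сохранением порядка
--     uniq: list[str] = []
--     seen: set[str] = set()
--     for name in out:
--         if name not in seen:
--             seen.add(name)
--             uniq.append(name)
--     return uniq
-- ===== SOURCE B (Python) =====
-- def _docx_parts_for_parse(names: set[str]) -> list[str]:
--     # One pass classifies each name into one of 7 ordered buckets; buckets for
--     # header/footer/glossary parts are sorted, the rest hold at most one name each.
--     buckets = [[] for _ in range(7)]
--     for n in names:
--         if n == "word/document.xml":
--             buckets[0].append(n)
--         elif n == "word/footnotes.xml":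
--             buckets[3].append(n)
--         elif n == "word/endnotes.xml":
--             buckets[4].append(n)
--         elif n == "word/comments.xml":
--             buckets[5].append(n)
--         elif n.endswith(".xml"):
--             if n.startswith("word/header"):
--                 buckets[1].append(n)
--             elif n.startswith("word/footer"):
--                 buckets[2].append(n)
--             elif n.startswith("word/glossary/"):
--                 buckets[6].append(n)
--     for i in (1, 2, 6):
--         buckets[i].sort()
--     return [n for b in buckets for n in b]
-- ===== Notes on version B (the rewrite author's own statement) =====
-- stated objective: alternative
-- what changed: A scans the set four separate times (membership probe, two prefix-filtered sorts, literal probes, glossary sort) and then deduplicates; B classifies each name once into one of 7 ordered buckets in a single pass, sorts the three prefix buckets, and concatenates, with no dedup pass since the buckets are disjoint. Pre_ requires the list modelling the input set to have distinct elements, as a Python set always does.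
import Mathlib
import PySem

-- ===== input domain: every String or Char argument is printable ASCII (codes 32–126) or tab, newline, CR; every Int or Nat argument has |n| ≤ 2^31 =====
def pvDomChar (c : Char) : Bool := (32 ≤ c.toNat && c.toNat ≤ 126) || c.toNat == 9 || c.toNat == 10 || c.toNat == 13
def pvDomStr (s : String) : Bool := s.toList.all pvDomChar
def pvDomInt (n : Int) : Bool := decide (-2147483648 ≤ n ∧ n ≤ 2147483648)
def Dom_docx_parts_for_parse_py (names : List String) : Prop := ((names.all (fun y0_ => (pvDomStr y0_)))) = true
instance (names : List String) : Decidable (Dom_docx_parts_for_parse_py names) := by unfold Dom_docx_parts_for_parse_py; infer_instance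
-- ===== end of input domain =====

-- B classifies each name once into one of seven ordered buckets (single pass + three bucket sorts)
-- instead of A's four separate scans of the set followed by an order-preserving dedup.


-- ===== PORT A =====
def docx_parts_for_parse_py (names : List String) : List String :=
  let out : List String := []
  let out := if PySem.Set.contains names "word/document.xml" then out ++ ["word/document.xml"] else out
  let out := ["word/header", "word/footer"].foldl (fun out pre =>
      (PySem.List.sorted (names.filter (fun x => PySem.Str.startswith x pre && PySem.Str.endswith x ".xml")) (fun x => x.toList) false).foldl
        (fun out name => out ++ [name]) out) out
  let out := ["word/footnotes.xml", "word/endnotes.xml", "word/comments.xml"].foldl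
      (fun out name => if PySem.Set.contains names name then out ++ [name] else out) out
  let out := (PySem.List.sorted (names.filter (fun x => PySem.Str.startswith x "word/glossary/" && PySem.Str.endswith x ".xml")) (fun x => x.toList) false).foldl
      (fun out name => out ++ [name]) out
  -- unique with order kept
  (out.foldl (fun (acc : List String × PySem.Set String) name =>
      if PySem.Set.contains acc.2 name then acc else (acc.1 ++ [name], PySem.Set.add acc.2 name))
    ([], PySem.Set.empty)).1

-- ===== PORT B =====
-- B-side state: seven buckets, filled in one pass over the names
def pvStep (b : List String × List String × List String × List String × List String × List String × List String)
    (n : String) : List String × List String × List String × List String × List String × List String × List String :=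
  if n == "word/document.xml" then (b.1 ++ [n], b.2.1, b.2.2.1, b.2.2.2.1, b.2.2.2.2.1, b.2.2.2.2.2.1, b.2.2.2.2.2.2)
  else if n == "word/footnotes.xml" then (b.1, b.2.1, b.2.2.1, b.2.2.2.1 ++ [n], b.2.2.2.2.1, b.2.2.2.2.2.1, b.2.2.2.2.2.2)
  else if n == "word/endnotes.xml" then (b.1, b.2.1, b.2.2.1, b.2.2.2.1, b.2.2.2.2.1 ++ [n], b.2.2.2.2.2.1, b.2.2.2.2.2.2)
  else if n == "word/comments.xml" then (b.1, b.2.1, b.2.2.1, b.2.2.2.1, b.2.2.2.2.1, b.2.2.2.2.2.1 ++ [n], b.2.2.2.2.2.2)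
  else if PySem.Str.endswith n ".xml" then
    if PySem.Str.startswith n "word/header" then (b.1, b.2.1 ++ [n], b.2.2.1, b.2.2.2.1, b.2.2.2.2.1, b.2.2.2.2.2.1, b.2.2.2.2.2.2)
    else if PySem.Str.startswith n "word/footer" then (b.1, b.2.1, b.2.2.1 ++ [n], b.2.2.2.1, b.2.2.2.2.1, b.2.2.2.2.2.1, b.2.2.2.2.2.2)
    else if PySem.Str.startswith n "word/glossary/" then (b.1, b.2.1, b.2.2.1, b.2.2.2.1, b.2.2.2.2.1, b.2.2.2.2.2.1, b.2.2.2.2.2.2 ++ [n])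
    else b
  else b

def docx_parts_for_parse_py_alt (names : List String) : List String :=
  let b := names.foldl pvStep ([], [], [], [], [], [], [])
  b.1 ++ PySem.List.sorted b.2.1 (fun x => x.toList) false ++ PySem.List.sorted b.2.2.1 (fun x => x.toList) false
    ++ b.2.2.2.1 ++ b.2.2.2.2.1 ++ b.2.2.2.2.2.1
    ++ PySem.List.sorted b.2.2.2.2.2.2 (fun x => x.toList) false

-- ===== PRECONDITION & SPEC =====
-- names models a Python set[str]; under the type convention its List holds DISTINCT elements,
-- so Pre_ requires Nodup (a duplicate-carrying list encodes no Python input of A).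
def Pre_docx_parts_for_parse_py (names : List String) : Prop := names.Nodup
instance (names : List String) : Decidable (Pre_docx_parts_for_parse_py names) := by unfold Pre_docx_parts_for_parse_py; infer_instance
def pvWitness_docx_parts_for_parse_py : List String :=
  ["word/document.xml", "word/header2.xml", "word/header1.xml", "word/glossary/a.xml", "word/comments.xml", "notes.txt"]

def Spec_docx_parts_for_parse_py (names : List String) (out : List String) : Prop := out = docx_parts_for_parse_py_alt names
instance (names : List String) (out : List String) : Decidable (Spec_docx_parts_for_parse_py names out) := by unfold Spec_docx_parts_for_parse_py; infer_instance

-- ===== CLAIM (what is proved, stated in full; the proofs are below) =====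
def Claim_equal_docx_parts_for_parse_py : Prop := ∀ (names : List String), Dom_docx_parts_for_parse_py names → Pre_docx_parts_for_parse_py names → Spec_docx_parts_for_parse_py names (docx_parts_for_parse_py names)

-- ===== LEMMAS AND PROOFS =====

-- classification helper: the bucket (0..6) a name falls into, mirroring B's branch chain
def pvCat (n : String) : Option Nat :=
  if n == "word/document.xml" then some 0
  else if n == "word/footnotes.xml" then some 3
  else if n == "word/endnotes.xml" then some 4
  else if n == "word/comments.xml" then some 5
  else if PySem.Str.endswith n ".xml" then
    if PySem.Str.startswith n "word/header" then some 1
    else if PySem.Str.startswith n "word/footer" then some 2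
    else if PySem.Str.startswith n "word/glossary/" then some 6
    else none
  else none

def pvCnt (i : Nat) (n : String) : List String := if pvCat n == some i then [n] else []

def pvQ (i : Nat) (n : String) : Bool := pvCat n == some i

lemma pv_step_eq (b : List String × List String × List String × List String × List String × List String × List String)
    (n : String) :
    pvStep b n = (b.1 ++ pvCnt 0 n, b.2.1 ++ pvCnt 1 n, b.2.2.1 ++ pvCnt 2 n, b.2.2.2.1 ++ pvCnt 3 n,
      b.2.2.2.2.1 ++ pvCnt 4 n, b.2.2.2.2.2.1 ++ pvCnt 5 n, b.2.2.2.2.2.2 ++ pvCnt 6 n) := by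
  by_cases h0 : n = "word/document.xml"
  · subst h0; simp [pvStep, pvCnt, pvCat]
  by_cases h3 : n = "word/footnotes.xml"
  · subst h3; simp [pvStep, pvCnt, pvCat]
  by_cases h4 : n = "word/endnotes.xml"
  · subst h4; simp [pvStep, pvCnt, pvCat]
  by_cases h5 : n = "word/comments.xml"
  · subst h5; simp [pvStep, pvCnt, pvCat]
  simp only [pvStep, pvCnt, pvCat, beq_iff_eq, h0, h3, h4, h5, if_false]
  split_ifs <;> simp_all

lemma pv_cnt_append (i : Nat) (x : String) (r : List String) :
    pvCnt i x ++ r = if pvQ i x then x :: r else r := by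
  unfold pvCnt pvQ
  split <;> simp

lemma pv_fold_eq (l : List String)
    (b : List String × List String × List String × List String × List String × List String × List String) :
    l.foldl pvStep b = (b.1 ++ l.filter (pvQ 0), b.2.1 ++ l.filter (pvQ 1), b.2.2.1 ++ l.filter (pvQ 2),
      b.2.2.2.1 ++ l.filter (pvQ 3), b.2.2.2.2.1 ++ l.filter (pvQ 4), b.2.2.2.2.2.1 ++ l.filter (pvQ 5),
      b.2.2.2.2.2.2 ++ l.filter (pvQ 6)) := by
  induction l generalizing b with
  | nil => simp
  | cons x t ih =>
    simp only [List.foldl_cons, pv_step_eq, ih, List.filter_cons, List.append_assoc, pv_cnt_append]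

-- B's result in canonical shape
lemma pv_alt_eq (names : List String) :
    docx_parts_for_parse_py_alt names =
      names.filter (pvQ 0)
      ++ PySem.List.sorted (names.filter (pvQ 1)) (fun x => x.toList) false
      ++ PySem.List.sorted (names.filter (pvQ 2)) (fun x => x.toList) false
      ++ names.filter (pvQ 3) ++ names.filter (pvQ 4) ++ names.filter (pvQ 5)
      ++ PySem.List.sorted (names.filter (pvQ 6)) (fun x => x.toList) false := by
  unfold docx_parts_for_parse_py_alt
  rw [pv_fold_eq]
  simp [List.append_assoc]

lemma pv_prefix_excl {n p q : String}
    (h1 : PySem.Str.startswith n p = true) (h2 : PySem.Str.startswith n q = true)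
    (hnp : ¬ p.toList <+: q.toList) (hnq : ¬ q.toList <+: p.toList) : False := by
  rw [PySem.Str.startswith_eq, PySem.Chars.startswith_iff] at h1 h2
  rcases List.prefix_or_prefix_of_prefix h1 h2 with h | h
  · exact hnp h
  · exact hnq h

-- pointwise: each category agrees with the test A's corresponding scan uses
lemma pvQ0_eq (n : String) : pvQ 0 n = (n == "word/document.xml") := by
  by_cases h0 : n = "word/document.xml"
  · subst h0; decide
  simp only [pvQ, pvCat, beq_iff_eq, h0, if_false]
  split_ifs <;> simp_all

lemma pvQ3_eq (n : String) : pvQ 3 n = (n == "word/footnotes.xml") := by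
  by_cases h3 : n = "word/footnotes.xml"
  · subst h3; decide
  simp only [pvQ, pvCat, beq_iff_eq, h3]
  split_ifs <;> simp_all

lemma pvQ4_eq (n : String) : pvQ 4 n = (n == "word/endnotes.xml") := by
  by_cases h4 : n = "word/endnotes.xml"
  · subst h4; decide
  simp only [pvQ, pvCat, beq_iff_eq, h4]
  split_ifs <;> simp_all

lemma pvQ5_eq (n : String) : pvQ 5 n = (n == "word/comments.xml") := by
  by_cases h5 : n = "word/comments.xml"
  · subst h5; decide
  simp only [pvQ, pvCat, beq_iff_eq, h5]
  split_ifs <;> simp_all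

lemma pvQ1_eq (n : String) :
    pvQ 1 n = (PySem.Str.startswith n "word/header" && PySem.Str.endswith n ".xml") := by
  by_cases h0 : n = "word/document.xml"; · subst h0; decide
  by_cases h3 : n = "word/footnotes.xml"; · subst h3; decide
  by_cases h4 : n = "word/endnotes.xml"; · subst h4; decide
  by_cases h5 : n = "word/comments.xml"; · subst h5; decide
  by_cases he : PySem.Str.endswith n ".xml" = true
  · by_cases hh : PySem.Str.startswith n "word/header" = true
    · simp at he hh; simp [pvQ, pvCat, h0, h3, h4, h5, he, hh]
    · simp at he hh; simp [pvQ, pvCat, h0, h3, h4, h5, he, hh]; all_goals (split_ifs <;> simp_all)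
  · by_cases hh : PySem.Str.startswith n "word/header" = true
    · simp at he hh; simp [pvQ, pvCat, h0, h3, h4, h5, he, hh]
    · simp at he hh; simp [pvQ, pvCat, h0, h3, h4, h5, he, hh]

lemma pvQ2_eq (n : String) :
    pvQ 2 n = (PySem.Str.startswith n "word/footer" && PySem.Str.endswith n ".xml") := by
  by_cases h0 : n = "word/document.xml"; · subst h0; decide
  by_cases h3 : n = "word/footnotes.xml"; · subst h3; decide
  by_cases h4 : n = "word/endnotes.xml"; · subst h4; decide
  by_cases h5 : n = "word/comments.xml"; · subst h5; decide
  by_cases he : PySem.Str.endswith n ".xml" = true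
  · by_cases hf : PySem.Str.startswith n "word/footer" = true
    · have hh : ¬ PySem.Str.startswith n "word/header" = true := fun hh =>
        pv_prefix_excl hh hf (by decide) (by decide)
      simp at he hf hh; simp [pvQ, pvCat, h0, h3, h4, h5, he, hf, hh]
    · by_cases hh : PySem.Str.startswith n "word/header" = true
      · simp at he hf hh; simp [pvQ, pvCat, h0, h3, h4, h5, he, hf, hh]
      · simp at he hf hh; simp [pvQ, pvCat, h0, h3, h4, h5, he, hf, hh]
  · by_cases hf : PySem.Str.startswith n "word/footer" = true
    · simp at he hf; simp [pvQ, pvCat, h0, h3, h4, h5, he, hf]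
    · simp at he hf; simp [pvQ, pvCat, h0, h3, h4, h5, he, hf]

lemma pvQ6_eq (n : String) :
    pvQ 6 n = (PySem.Str.startswith n "word/glossary/" && PySem.Str.endswith n ".xml") := by
  by_cases h0 : n = "word/document.xml"; · subst h0; decide
  by_cases h3 : n = "word/footnotes.xml"; · subst h3; decide
  by_cases h4 : n = "word/endnotes.xml"; · subst h4; decide
  by_cases h5 : n = "word/comments.xml"; · subst h5; decide
  by_cases he : PySem.Str.endswith n ".xml" = true
  · by_cases hg : PySem.Str.startswith n "word/glossary/" = true
    · have hh : ¬ PySem.Str.startswith n "word/header" = true := fun hh =>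
        pv_prefix_excl hh hg (by decide) (by decide)
      have hf : ¬ PySem.Str.startswith n "word/footer" = true := fun hf =>
        pv_prefix_excl hf hg (by decide) (by decide)
      simp at he hg hh hf; simp [pvQ, pvCat, h0, h3, h4, h5, he, hg, hh, hf]
    · by_cases hh : PySem.Str.startswith n "word/header" = true
      · simp at he hg hh; simp [pvQ, pvCat, h0, h3, h4, h5, he, hg, hh]
      · by_cases hf : PySem.Str.startswith n "word/footer" = true
        · simp at he hg hh hf; simp [pvQ, pvCat, h0, h3, h4, h5, he, hg, hh, hf]
        · simp at he hg hh hf; simp [pvQ, pvCat, h0, h3, h4, h5, he, hg, hh, hf]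
  · by_cases hg : PySem.Str.startswith n "word/glossary/" = true
    · simp at he hg; simp [pvQ, pvCat, h0, h3, h4, h5, he, hg]
    · simp at he hg; simp [pvQ, pvCat, h0, h3, h4, h5, he, hg]

-- a filter for one exact name over a duplicate-free list is a membership singleton
lemma pv_filter_beq (l : List String) (c : String) (h : l.Nodup) :
    l.filter (fun x => x == c) = if c ∈ l then [c] else [] := by
  induction l with
  | nil => simp
  | cons x t ih =>
    rcases List.nodup_cons.mp h with ⟨hx, ht⟩
    by_cases hxc : x = c
    · subst hxc
      have hnc : ¬ x ∈ t := hx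
      have : t.filter (fun y => y == x) = [] := by
        rw [ih ht]; simp [hnc]
      simp [this]
    · simp [hxc, ih ht, Ne.symm hxc]

lemma pv_ite_app (c : Prop) [Decidable c] (a : List String) (x : String) :
    (if c then a ++ [x] else a) = a ++ (if c then [x] else []) := by
  split <;> simp

-- A's accumulated list (before the dedup pass) equals B's result, on duplicate-free input
lemma pv_a_pre (names : List String) (h : names.Nodup) :
    docx_parts_for_parse_py names =
      ((docx_parts_for_parse_py_alt names).foldl (fun (acc : List String × PySem.Set String) name =>
        if PySem.Set.contains acc.2 name then acc else (acc.1 ++ [name], PySem.Set.add acc.2 name))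
        ([], PySem.Set.empty)).1 := by
  have h0 : names.filter (pvQ 0) = if "word/document.xml" ∈ names then ["word/document.xml"] else [] := by
    rw [List.filter_congr (fun x _ => pvQ0_eq x), pv_filter_beq _ _ h]
  have h3 : names.filter (pvQ 3) = if "word/footnotes.xml" ∈ names then ["word/footnotes.xml"] else [] := by
    rw [List.filter_congr (fun x _ => pvQ3_eq x), pv_filter_beq _ _ h]
  have h4 : names.filter (pvQ 4) = if "word/endnotes.xml" ∈ names then ["word/endnotes.xml"] else [] := by
    rw [List.filter_congr (fun x _ => pvQ4_eq x), pv_filter_beq _ _ h]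
  have h5 : names.filter (pvQ 5) = if "word/comments.xml" ∈ names then ["word/comments.xml"] else [] := by
    rw [List.filter_congr (fun x _ => pvQ5_eq x), pv_filter_beq _ _ h]
  have h1 : names.filter (pvQ 1) = names.filter (fun x => PySem.Str.startswith x "word/header" && PySem.Str.endswith x ".xml") :=
    List.filter_congr (fun x _ => pvQ1_eq x)
  have h2 : names.filter (pvQ 2) = names.filter (fun x => PySem.Str.startswith x "word/footer" && PySem.Str.endswith x ".xml") :=
    List.filter_congr (fun x _ => pvQ2_eq x)
  have h6 : names.filter (pvQ 6) = names.filter (fun x => PySem.Str.startswith x "word/glossary/" && PySem.Str.endswith x ".xml") :=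
    List.filter_congr (fun x _ => pvQ6_eq x)
  unfold docx_parts_for_parse_py
  rw [pv_alt_eq, h0, h1, h2, h3, h4, h5, h6]
  simp only [List.foldl_cons, List.foldl_nil, PySem.List.foldl_append_singleton_eq_self,
    List.nil_append, pv_ite_app, PySem.Set.contains_iff, List.append_assoc]

-- the dedup loop is the identity on a duplicate-free list
lemma pv_dedup_fold (l : List String) (acc : List String) (seen : PySem.Set String)
    (hd : ∀ x ∈ l, x ∉ seen) (hl : l.Nodup) :
    (l.foldl (fun (acc : List String × PySem.Set String) name =>
        if PySem.Set.contains acc.2 name then acc else (acc.1 ++ [name], PySem.Set.add acc.2 name))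
      (acc, seen)).1 = acc ++ l := by
  induction l generalizing acc seen with
  | nil => simp
  | cons x t ih =>
    rcases List.nodup_cons.mp hl with ⟨hx, ht⟩
    have hmx : x ∉ seen := hd x (by simp)
    have hcx : PySem.Set.contains seen x = false := by
      rw [← Bool.not_eq_true, PySem.Set.contains_iff]
      exact hmx
    have hadd : PySem.Set.add seen x = seen ++ [x] := by
      unfold PySem.Set.add
      rw [hcx]
      simp
    have hd' : ∀ y ∈ t, y ∉ (seen ++ [x] : List String) := by
      intro y hy
      simp only [List.mem_append, List.mem_singleton]
      rintro (hys | rfl)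
      · exact hd y (by simp [hy]) hys
      · exact hx hy
    simp only [List.foldl_cons, hcx, Bool.false_eq_true, if_false, hadd]
    rw [ih (acc ++ [x]) (seen ++ [x]) hd' ht]
    simp

-- every name in a bucket carries that bucket's category
lemma pv_mem_filter_cat {i : Nat} {x : String} {names : List String}
    (hx : x ∈ names.filter (pvQ i)) : pvCat x = some i := by
  have := (List.mem_filter.mp hx).2
  simpa [pvQ] using this

lemma pv_mem_sorted_cat {i : Nat} {x : String} {names : List String}
    (hx : x ∈ PySem.List.sorted (names.filter (pvQ i)) (fun s => s.toList) false) : pvCat x = some i := by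
  rw [PySem.List.mem_sorted] at hx
  exact pv_mem_filter_cat hx

lemma pv_nodup7 (l0 l1 l2 l3 l4 l5 l6 : List String)
    (h0 : l0.Nodup) (h1 : l1.Nodup) (h2 : l2.Nodup) (h3 : l3.Nodup) (h4 : l4.Nodup) (h5 : l5.Nodup) (h6 : l6.Nodup)
    (m0 : ∀ x ∈ l0, pvCat x = some 0) (m1 : ∀ x ∈ l1, pvCat x = some 1) (m2 : ∀ x ∈ l2, pvCat x = some 2)
    (m3 : ∀ x ∈ l3, pvCat x = some 3) (m4 : ∀ x ∈ l4, pvCat x = some 4) (m5 : ∀ x ∈ l5, pvCat x = some 5)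
    (m6 : ∀ x ∈ l6, pvCat x = some 6) :
    (l0 ++ l1 ++ l2 ++ l3 ++ l4 ++ l5 ++ l6).Nodup := by
  have dis : ∀ {i j : Nat} {li lj : List String}, i ≠ j → (∀ x ∈ li, pvCat x = some i) →
      (∀ x ∈ lj, pvCat x = some j) → li.Disjoint lj := by
    intro i j li lj hij hi hj x hxi hxj
    have hhi := hi x hxi
    have hhj := hj x hxj
    rw [hhi] at hhj
    exact hij (by simpa using hhj)
  have n56 := h5.append h6 (dis (by decide) m5 m6)
  have n456 := h4.append n56 (List.disjoint_append_right.mpr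
    ⟨dis (by decide) m4 m5, dis (by decide) m4 m6⟩)
  have n3456 := h3.append n456 (by
    simp only [List.disjoint_append_right]
    exact ⟨dis (by decide) m3 m4, dis (by decide) m3 m5, dis (by decide) m3 m6⟩)
  have n23456 := h2.append n3456 (by
    simp only [List.disjoint_append_right]
    exact ⟨dis (by decide) m2 m3, dis (by decide) m2 m4, dis (by decide) m2 m5, dis (by decide) m2 m6⟩)
  have n123456 := h1.append n23456 (by
    simp only [List.disjoint_append_right]
    exact ⟨dis (by decide) m1 m2, dis (by decide) m1 m3, dis (by decide) m1 m4,
      dis (by decide) m1 m5, dis (by decide) m1 m6⟩)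
  have nall := h0.append n123456 (by
    simp only [List.disjoint_append_right]
    exact ⟨dis (by decide) m0 m1, dis (by decide) m0 m2, dis (by decide) m0 m3,
      dis (by decide) m0 m4, dis (by decide) m0 m5, dis (by decide) m0 m6⟩)
  simpa [List.append_assoc] using nall

lemma pv_alt_nodup (names : List String) (h : names.Nodup) :
    (docx_parts_for_parse_py_alt names).Nodup := by
  rw [pv_alt_eq]
  have hf : ∀ i : Nat, (names.filter (pvQ i)).Nodup := fun i => h.filter _
  have hs : ∀ i : Nat, (PySem.List.sorted (names.filter (pvQ i)) (fun s : String => s.toList) false).Nodup :=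
    fun i => ((PySem.List.sorted_perm (names.filter (pvQ i)) (fun s : String => s.toList) false)).symm.nodup (hf i)
  exact pv_nodup7 _ _ _ _ _ _ _ (hf 0) (hs 1) (hs 2) (hf 3) (hf 4) (hf 5) (hs 6)
    (fun x hx => pv_mem_filter_cat hx) (fun x hx => pv_mem_sorted_cat hx) (fun x hx => pv_mem_sorted_cat hx)
    (fun x hx => pv_mem_filter_cat hx) (fun x hx => pv_mem_filter_cat hx) (fun x hx => pv_mem_filter_cat hx)
    (fun x hx => pv_mem_sorted_cat hx)

-- ===== VERDICT (by name: the statement is the Claim_ definition above) =====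
theorem docx_parts_for_parse_py_spec : Claim_equal_docx_parts_for_parse_py := by
  intro names _ hpre
  unfold Spec_docx_parts_for_parse_py
  rw [pv_a_pre names hpre]
  have := pv_dedup_fold (docx_parts_for_parse_py_alt names) [] PySem.Set.empty
    (by intro x _ hmem; simp [PySem.Set.empty] at hmem) (pv_alt_nodup names hpre)
  simpa using this
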